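-- pv_equiv track=rewrite | github.com/e0xextazy/mtscup-2023 | nn_gen_data.py | get_tensor
-- ===== SOURCE A (Python) =====
-- def get_tensor(text, words_dict, top_n=5):
--     text_split = str(text).split()
--     token_indx = []
--     for word in text_split:
--         token_indx.append(words_dict.get(word, 0))
--
--     token_indx = token_indx[:top_n]
--     if len(token_indx) < top_n:
--         token_indx += [0]*(top_n - len(token_indx))
--
--     return token_indx
-- ===== SOURCE B (Python) =====
-- def get_tensor(text, words_dict, top_n=5):
--     # Fixed-size buffer filled in place in one early-stopping pass:
--     # no separate truncation or padding step.
--     res = [0] * top_n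
--     for i, word in enumerate(str(text).split()):
--         if i >= top_n:
--             break
--         res[i] = words_dict.get(word, 0)
--     return res
-- ===== Notes on version B (the rewrite author's own statement) =====
-- stated objective: alternative
-- what changed: Replaces A's build-full-token-list then slice then pad-tail assembly with a preallocated [0]*top_n buffer filled in place during a single early-stopping pass over the words.
-- outside the precondition, e.g. on get_tensor('a b c', {}, -1): A returns [0, 0], B returns []
import Mathlib
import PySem

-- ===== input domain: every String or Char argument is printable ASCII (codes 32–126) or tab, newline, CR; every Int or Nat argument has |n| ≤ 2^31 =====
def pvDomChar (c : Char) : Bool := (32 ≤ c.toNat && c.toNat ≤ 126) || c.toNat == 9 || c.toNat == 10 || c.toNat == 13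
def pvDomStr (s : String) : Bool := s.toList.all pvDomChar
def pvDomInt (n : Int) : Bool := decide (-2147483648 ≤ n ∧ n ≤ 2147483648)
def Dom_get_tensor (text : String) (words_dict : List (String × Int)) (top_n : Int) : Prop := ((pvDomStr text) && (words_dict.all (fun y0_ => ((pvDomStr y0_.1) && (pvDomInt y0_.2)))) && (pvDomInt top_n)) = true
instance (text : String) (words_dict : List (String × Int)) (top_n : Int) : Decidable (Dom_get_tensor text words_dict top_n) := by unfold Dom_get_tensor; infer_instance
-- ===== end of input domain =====

-- B replaces A's build-full-list → slice → pad-tail assembly with a preallocated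
-- fixed-size buffer filled in place during one early-stopping pass (alternative decomposition).


-- ===== PORT A =====
def get_tensor (text : String) (words_dict : List (String × Int)) (top_n : Int) : List Int :=
  let text_split := PySem.Str.split₀ text
  let token_indx : List Int :=
    text_split.foldl (fun acc word => acc ++ [(PySem.Dict.ofList words_dict).getD word 0]) []
  let token_indx := PySem.List.slice token_indx none (some top_n)
  if (token_indx.length : Int) < top_n then
    token_indx ++ PySem.List.pyRepeat [(0 : Int)] (top_n - (token_indx.length : Int))
  else token_indx

-- ===== PORT B =====
-- the 'for i, word in enumerate(...): if i >= top_n: break; res[i] = ...' loop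
def gtFill (wd : PySem.Dict String Int) (top_n : Int) :
    List String → Int → List Int → List Int
  | [], _, res => res
  | word :: ws, i, res =>
    if top_n ≤ i then res
    else gtFill wd top_n ws (i + 1) (PySem.List.pySetD res i (wd.getD word 0))

def get_tensor_alt (text : String) (words_dict : List (String × Int)) (top_n : Int) : List Int :=
  let res := PySem.List.pyRepeat [(0 : Int)] top_n
  gtFill (PySem.Dict.ofList words_dict) top_n (PySem.Str.split₀ text) 0 res

-- ===== PRECONDITION & SPEC =====
-- Pre_ excludes negative top_n, on which A still returns: there A's slice drops words from the
-- END without padding (an artefact of Python's negative-slice semantics, no fixed-length tensor),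
-- while B's natural buffer is empty — a corner no caller of a pad-to-top_n tokenizer specifies.
def Pre_get_tensor (text : String) (words_dict : List (String × Int)) (top_n : Int) : Prop :=
  0 ≤ top_n
instance (text : String) (words_dict : List (String × Int)) (top_n : Int) : Decidable (Pre_get_tensor text words_dict top_n) := by unfold Pre_get_tensor; infer_instance

def pvWitness_get_tensor : String × (List (String × Int)) × Int :=
  ("hello world foo", [("hello", 3), ("foo", 7)], 4)

def Spec_get_tensor (text : String) (words_dict : List (String × Int)) (top_n : Int) (out : List Int) : Prop := out = get_tensor_alt text words_dict top_n
instance (text : String) (words_dict : List (String × Int)) (top_n : Int) (out : List Int) : Decidable (Spec_get_tensor text words_dict top_n out) := by unfold Spec_get_tensor; infer_instance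

-- ===== CLAIM (what is proved, stated in full; the proofs are below) =====
def Claim_equal_get_tensor : Prop := ∀ (text : String) (words_dict : List (String × Int)) (top_n : Int), Dom_get_tensor text words_dict top_n → Pre_get_tensor text words_dict top_n → Spec_get_tensor text words_dict top_n (get_tensor text words_dict top_n)

-- ===== LEMMAS AND PROOFS =====

theorem gtDropSuccSet (v : Int) : ∀ (res : List Int) (i : Nat),
    (res.set i v).drop (i + 1) = res.drop (i + 1) := by
  intro res
  induction res with
  | nil => intro i; simp
  | cons a res ih =>
    intro i
    cases i with
    | zero => simp
    | succ j => simpa using ih j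

theorem gtTakeSuccSet (v : Int) : ∀ (res : List Int) (i : Nat), i < res.length →
    (res.set i v).take (i + 1) = res.take i ++ [v] := by
  intro res
  induction res with
  | nil => intro i h; simp at h
  | cons a res ih =>
    intro i h
    cases i with
    | zero => simp
    | succ j =>
      simp only [List.set_cons_succ, List.take_succ_cons, List.cons_append]
      rw [ih j (by simpa using h)]

-- The buffer loop, started at position i of an n-buffer whose tail from i is zeros,
-- produces: untouched prefix ++ looked-up words (truncated) ++ remaining zeros.
theorem gtFill_eq (wd : PySem.Dict String Int) (n : Nat) :
    ∀ (ws : List String) (i : Nat) (res : List Int), res.length = n →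
      res.drop i = List.replicate (n - i) 0 →
      gtFill wd (n : Int) ws (i : Int) res =
        res.take i ++ (ws.map (fun w => wd.getD w 0)).take (n - i)
          ++ List.replicate (n - i - ws.length) 0 := by
  intro ws
  induction ws with
  | nil =>
    intro i res hlen hdrop
    simp [gtFill, ← hdrop, List.take_append_drop]
  | cons word ws ih =>
    intro i res hlen hdrop
    by_cases h : (n : Int) ≤ (i : Int)
    · have hni : n ≤ i := by exact_mod_cast h
      have h0 : n - i = 0 := Nat.sub_eq_zero_of_le hni
      simp [gtFill, h, h0, List.take_of_length_le (by omega : res.length ≤ i)]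
    · have hin : i < n := by omega
      have hires : i < res.length := by omega
      rw [gtFill, if_neg h]
      rw [PySem.List.pySetD_natCast res i _]
      have hcast : ((i : Int) + 1) = ((i + 1 : Nat) : Int) := by push_cast; ring
      rw [hcast]
      have hlen' : (res.set i (wd.getD word 0)).length = n := by simp [hlen]
      have hdrop' : (res.set i (wd.getD word 0)).drop (i + 1) = List.replicate (n - (i + 1)) 0 := by
        rw [gtDropSuccSet]
        have := congrArg (List.drop 1) hdrop
        simpa [List.drop_drop, Nat.add_comm 1 i, List.drop_replicate] using this
      rw [ih (i + 1) _ hlen' hdrop']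
      have htake1 : (res.set i (wd.getD word 0)).take (i + 1) =
          res.take i ++ [wd.getD word 0] :=
        gtTakeSuccSet _ res i hires
      rw [htake1]
      have h1 : n - i = (n - (i + 1)) + 1 := by omega
      have h2 : n - i - (word :: ws).length = n - (i + 1) - ws.length := by
        simp only [List.length_cons]; omega
      rw [h2, List.map_cons, h1, List.take_succ_cons]
      simp [List.append_assoc]

theorem get_tensor_eq_closed (text : String) (words_dict : List (String × Int)) (n : Nat) :
    get_tensor text words_dict (n : Int) =
      ((PySem.Str.split₀ text).map (fun w => (PySem.Dict.ofList words_dict).getD w 0)).take n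
        ++ List.replicate (n - (PySem.Str.split₀ text).length) 0 := by
  unfold get_tensor
  simp only [PySem.List.foldl_append_singleton_eq_map, List.nil_append,
    PySem.List.slice_to_natCast]
  set L := (PySem.Str.split₀ text).map (fun w => (PySem.Dict.ofList words_dict).getD w 0) with hL
  have hlenL : L.length = (PySem.Str.split₀ text).length := by simp [hL]
  have hml : (L.take n).length = min n L.length := by simp
  by_cases h : ((L.take n).length : Int) < (n : Int)
  · rw [if_pos h]
    have h' : (L.take n).length < n := by exact_mod_cast h
    have hlt : L.length < n := by omega
    congr 1
    rw [PySem.List.pyRepeat_singleton]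
    congr 1
    rw [← hlenL]
    omega
  · rw [if_neg h]
    have h' : n ≤ (L.take n).length := by exact_mod_cast not_lt.mp h
    have hge : n ≤ L.length := by omega
    rw [← hlenL, Nat.sub_eq_zero_of_le hge]
    simp

-- ===== VERDICT (by name: the statement is the Claim_ definition above) =====
theorem get_tensor_spec : Claim_equal_get_tensor := by
  intro text words_dict top_n hdom hpre
  unfold Spec_get_tensor
  lift top_n to ℕ using hpre with n
  rw [get_tensor_eq_closed]
  show _ = gtFill (PySem.Dict.ofList words_dict) (n : Int) (PySem.Str.split₀ text) 0
    (PySem.List.pyRepeat [(0 : Int)] (n : Int))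
  rw [PySem.List.pyRepeat_singleton, Int.toNat_natCast]
  have hg := gtFill_eq (PySem.Dict.ofList words_dict) n (PySem.Str.split₀ text) 0
    (List.replicate n 0) (by simp) (by simp)
  simp only [Nat.cast_zero, Nat.sub_zero] at hg
  rw [hg]
  simp
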